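-- pv_equiv track=rewrite | github.com/andrescardonare/DevOps_Python | concatenate_nth/concat.py | concatenate_nth
-- ===== SOURCE A (Python) =====
-- def concatenate_nth(words):
--     """Concatenate the nth letter from each word.
--
--     - words: list of strings
--     - For word at 1-based index n, take its nth character (also 1-based).
--     - If any word is shorter than n, return the error message:
--         "Invalid word list: not all words have required length"
--
--     Returns the concatenated string.
--     """
--     if not isinstance(words, (list, tuple)):
--         raise TypeError('words must be a list')
--
--     result_chars = []
--     for idx, word in enumerate(words, start=1):
--         if not isinstance(word, str):
--             return "Invalid word list: not all words have required length"
--         if len(word) < idx: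
--             return "Invalid word list: not all words have required length"
--         result_chars.append(word[idx-1])
--
--     return ''.join(result_chars)
-- ===== SOURCE B (Python) =====
-- def concatenate_nth(words):
--     if not isinstance(words, (list, tuple)):
--         raise TypeError('words must be a list')
--     for idx, word in enumerate(words, 1):
--         if not isinstance(word, str) or len(word) < idx:
--             return "Invalid word list: not all words have required length"
--     return ''.join(word[idx] for idx, word in enumerate(words))
-- ===== Notes on version B (the rewrite author's own statement) =====
-- stated objective: alternative
-- what changed: B separates validation from construction: a first pass checks every word's length against its 1-based index and on success a second pass joins the nth characters, instead of A's single interleaved loop with an accumulator.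
import Mathlib
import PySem

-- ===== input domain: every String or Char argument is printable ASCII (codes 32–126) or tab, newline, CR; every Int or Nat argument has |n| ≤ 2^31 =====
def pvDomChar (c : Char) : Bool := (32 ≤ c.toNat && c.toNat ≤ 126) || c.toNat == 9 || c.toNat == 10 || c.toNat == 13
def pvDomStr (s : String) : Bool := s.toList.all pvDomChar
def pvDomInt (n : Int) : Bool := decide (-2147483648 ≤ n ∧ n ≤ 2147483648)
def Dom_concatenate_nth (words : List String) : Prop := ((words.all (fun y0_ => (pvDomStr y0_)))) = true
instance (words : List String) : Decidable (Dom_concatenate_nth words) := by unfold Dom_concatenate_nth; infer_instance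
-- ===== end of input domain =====

-- B separates validation from construction (two passes) instead of A's single interleaved loop; same values everywhere.
-- ===== PORT A =====
-- loop of A: for idx, word in enumerate(words, 1): check len(word) < idx, else append word[idx-1]
-- (the getD is in range because the guard just ensured idx ≤ len word, so it is exactly word[idx-1])
def concatenate_nth_go : List String → Nat → List Char → String
  | [], _, acc => String.mk acc
  | w :: ws, idx, acc =>
    if w.toList.length < idx then "Invalid word list: not all words have required length"
    else concatenate_nth_go ws (idx + 1) (acc ++ [w.toList.getD (idx - 1) ' '])

def concatenate_nth (words : List String) : String :=
  concatenate_nth_go words 1 []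

-- ===== PORT B =====
-- validation pass: for idx, word in enumerate(words, 1): if len(word) < idx: invalid
def concatenate_nth_valid : List String → Nat → Bool
  | [], _ => true
  | w :: ws, idx => if w.toList.length < idx then false else concatenate_nth_valid ws (idx + 1)

-- construction pass: ''.join(word[idx] for idx, word in enumerate(words))  (0-based enumerate)
def concatenate_nth_alt (words : List String) : String :=
  if concatenate_nth_valid words 1 then
    String.mk ((words.zipIdx).map (fun p => p.1.toList.getD p.2 ' '))
  else "Invalid word list: not all words have required length"

-- ===== PRECONDITION & SPEC =====
def Spec_concatenate_nth (words : List String) (out : String) : Prop := out = concatenate_nth_alt words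
instance (words : List String) (out : String) : Decidable (Spec_concatenate_nth words out) := by unfold Spec_concatenate_nth; infer_instance

-- ===== CLAIM (what is proved, stated in full; the proofs are below) =====
def Claim_equal_concatenate_nth : Prop := ∀ (words : List String), Dom_concatenate_nth words → Spec_concatenate_nth words (concatenate_nth words)

-- ===== LEMMAS AND PROOFS =====

-- ===== VERDICT (by name: the statement is the Claim_ definition above) =====
theorem concatenate_nth_go_eq (ws : List String) : ∀ (idx : Nat) (acc : List Char),
    concatenate_nth_go ws (idx + 1) acc =
      if concatenate_nth_valid ws (idx + 1) then
        String.mk (acc ++ (ws.zipIdx idx).map (fun p => p.1.toList.getD p.2 ' '))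
      else "Invalid word list: not all words have required length" := by
  induction ws with
  | nil => intro idx acc; simp [concatenate_nth_go, concatenate_nth_valid]
  | cons w ws ih =>
    intro idx acc
    simp only [concatenate_nth_go, concatenate_nth_valid, List.zipIdx_cons]
    by_cases h : w.toList.length < idx + 1
    · have h' : w.length ≤ idx := by simp only [String.length_toList] at h; omega
      simp [h']
    · simp only [if_neg h]
      rw [ih (idx + 1)]
      by_cases hv : concatenate_nth_valid ws (idx + 1 + 1)
      · simp [hv]
      · simp [hv]

theorem concatenate_nth_spec : Claim_equal_concatenate_nth := by
  intro words _
  unfold Spec_concatenate_nth concatenate_nth concatenate_nth_alt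
  have := concatenate_nth_go_eq words 0 []
  simpa using this
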